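-- pv_equiv track=rewrite | github.com/s-koide-dc/Design2Code | src/utils/design_doc_parser.py | _extract_module_name
-- ===== SOURCE A (Python) =====
-- def _extract_module_name(content: str) -> str:
--     """H1ヘッダーからモジュール名を取得 (より柔軟なパース)"""
--     # 行頭の # から始まる最初の行をモジュール名とする
--     for line in content.splitlines():
--         if line.startswith("# "):
--             name = line[2:].strip()
--             if name.endswith("Design Document"):
--                 name = name[:-len("Design Document")].strip()
--             return name
--     # 予備のパターン: 行頭に関わらず最初の # を探す
--     for line in content.splitlines():
--         if "#" in line:
--             idx = line.find("#")
--             name = line[idx+1:].strip()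
--             return name if name else "UnknownModule"
--     return "UnknownModule"
-- ===== SOURCE B (Python) =====
-- def _extract_module_name(content: str) -> str:
--     """H1ヘッダーからモジュール名を取得 — single pass with a fallback accumulator."""
--     fallback = None
--     for line in content.splitlines():
--         if line.startswith("# "):
--             name = line[2:].strip()
--             if name.endswith("Design Document"):
--                 name = name[:-len("Design Document")].strip()
--             return name
--         if fallback is None and "#" in line:
--             fallback = line[line.find("#") + 1:].strip()
--     if fallback is not None:
--         return fallback if fallback else "UnknownModule"
--     return "UnknownModule"
-- ===== Notes on version B (the rewrite author's own statement) =====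
-- stated objective: simpler
-- what changed: Replaced A's two full passes over the lines (one for '# ' headers, a second fallback pass for any '#') by a single pass that records the first '#' fallback in an accumulator while still returning immediately on the first '# ' header.
import Mathlib
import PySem

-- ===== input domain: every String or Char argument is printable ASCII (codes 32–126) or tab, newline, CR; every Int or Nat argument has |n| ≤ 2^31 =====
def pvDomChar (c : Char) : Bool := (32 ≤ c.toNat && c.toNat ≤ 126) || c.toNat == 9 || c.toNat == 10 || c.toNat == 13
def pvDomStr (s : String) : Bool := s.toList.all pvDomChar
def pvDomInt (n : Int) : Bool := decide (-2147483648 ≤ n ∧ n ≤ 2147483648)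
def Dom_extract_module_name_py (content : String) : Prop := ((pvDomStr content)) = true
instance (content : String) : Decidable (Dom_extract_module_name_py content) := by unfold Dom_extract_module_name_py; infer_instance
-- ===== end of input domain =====

-- B replaces A's two passes over the lines by one pass with a fallback accumulator (objective: simpler).

-- ===== PORT A =====
-- name computed for a '# ' header line (line[2:].strip(), dropping a 'Design Document' suffix)
def pvH1Name (l : String) : String :=
  let name := PySem.Str.strip (PySem.Str.slice l (some 2) none)
  if PySem.Str.endswith name "Design Document" then
    PySem.Str.strip (PySem.Str.slice name none (some (-15))) -- len("Design Document") = 15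
  else name

-- A's first loop: first line starting with '# '
def pvScanH1 : List String → Option String
  | [] => none
  | l :: ls => if PySem.Str.startswith l "# " then some (pvH1Name l) else pvScanH1 ls

-- A's second loop: first line containing '#'
def pvScanHash : List String → String
  | [] => "UnknownModule"
  | l :: ls =>
    if PySem.Str.isIn "#" l then
      let idx := PySem.Str.find l "#"
      let name := PySem.Str.strip (PySem.Str.slice l (some (idx + 1)) none)
      if name = "" then "UnknownModule" else name
    else pvScanHash ls

def extract_module_name_py (content : String) : String :=
  match pvScanH1 (PySem.Str.splitlines content) with
  | some n => n
  | none => pvScanHash (PySem.Str.splitlines content)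

-- ===== PORT B =====
-- B's single pass: return on the first '# ' header, else record the first '#' fallback
def pvLoopB : List String → Option String → String
  | [], fb =>
    match fb with
    | some f => if f = "" then "UnknownModule" else f
    | none => "UnknownModule"
  | l :: ls, fb =>
    if PySem.Str.startswith l "# " then
      let name := PySem.Str.strip (PySem.Str.slice l (some 2) none)
      if PySem.Str.endswith name "Design Document" then
        PySem.Str.strip (PySem.Str.slice name none (some (-15)))
      else name
    else
      pvLoopB ls
        (if fb = none ∧ PySem.Str.isIn "#" l then
          some (PySem.Str.strip (PySem.Str.slice l (some (PySem.Str.find l "#" + 1)) none))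
        else fb)

def extract_module_name_py_alt (content : String) : String :=
  pvLoopB (PySem.Str.splitlines content) none

-- ===== PRECONDITION & SPEC =====
def Spec_extract_module_name_py (content : String) (out : String) : Prop := out = extract_module_name_py_alt content
instance (content : String) (out : String) : Decidable (Spec_extract_module_name_py content out) := by unfold Spec_extract_module_name_py; infer_instance

-- ===== CLAIM (what is proved, stated in full; the proofs are below) =====
def Claim_equal_extract_module_name_py : Prop := ∀ (content : String), Dom_extract_module_name_py content → Spec_extract_module_name_py content (extract_module_name_py content)

-- ===== LEMMAS AND PROOFS =====

-- the single pass with accumulator fb equals: first-H1 result, else finish fb, else the hash scan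
theorem pvLoopB_eq (ls : List String) : ∀ fb : Option String,
    pvLoopB ls fb =
      match pvScanH1 ls with
      | some n => n
      | none =>
        match fb with
        | some f => if f = "" then "UnknownModule" else f
        | none => pvScanHash ls := by
  induction ls with
  | nil => intro fb; cases fb <;> rfl
  | cons l ls ih =>
    intro fb
    by_cases h1 : PySem.Chars.startswith l.toList ['#', ' '] = true
    · cases fb <;> simp [pvLoopB, pvScanH1, pvH1Name, h1]
    · by_cases hin : PySem.Chars.isIn ['#'] l.toList = true
      · cases fb with
        | none => simp [pvLoopB, pvScanH1, h1, ih, pvScanHash, hin]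
        | some f => simp [pvLoopB, pvScanH1, h1, hin, ih]
      · cases fb with
        | none => simp [pvLoopB, pvScanH1, h1, hin, ih, pvScanHash]
        | some f => simp [pvLoopB, pvScanH1, h1, hin, ih]

-- ===== VERDICT (by name: the statement is the Claim_ definition above) =====
theorem extract_module_name_py_spec : Claim_equal_extract_module_name_py := by
  intro content _
  unfold Spec_extract_module_name_py extract_module_name_py extract_module_name_py_alt
  rw [pvLoopB_eq]
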